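-- pv_equiv track=rewrite | github.com/bloomberg/chromium.bb | tools/findit/findit_for_clusterfuzz.py | SplitStacktrace
-- ===== SOURCE A (Python) =====
-- def SplitStacktrace(stacktrace_string):
--   """Preprocesses stacktrace string into two parts, release and debug.
--
--   Args:
--     stacktrace_string: A string representation of stacktrace,
--                        in clusterfuzz format.
--
--   Returns:
--     A tuple of list of strings, release build stacktrace and
--     debug build stacktrace.
--   """
--   # Make sure we only parse release/debug build stacktrace, and ignore
--   # unsymbolised stacktrace.
--   in_release_or_debug_stacktrace = False
--   release_build_stacktrace_lines = None
--   debug_build_stacktrace_lines = None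
--   current_stacktrace_lines = []
--
--   # Iterate through all lines in stacktrace.
--   for line in stacktrace_string.splitlines():
--     line = line.strip()
--
--     # If the line starts with +, it signifies the start of new stacktrace.
--     if line.startswith('+-') and line.endswith('-+'):
--       if 'Release Build Stacktrace' in line:
--         in_release_or_debug_stacktrace = True
--         current_stacktrace_lines = []
--         release_build_stacktrace_lines = current_stacktrace_lines
--
--       elif 'Debug Build Stacktrace' in line:
--         in_release_or_debug_stacktrace = True
--         current_stacktrace_lines = []
--         debug_build_stacktrace_lines = current_stacktrace_lines
--
--       # If the stacktrace is neither release/debug build stacktrace, ignore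
--       # all lines after it until we encounter release/debug build stacktrace.
--       else:
--         in_release_or_debug_stacktrace = False
--
--     # This case, it must be that the line is an actual stack frame, so add to
--     # the current stacktrace.
--     elif in_release_or_debug_stacktrace:
--       current_stacktrace_lines.append(line)
--
--   return (release_build_stacktrace_lines, debug_build_stacktrace_lines)
-- ===== SOURCE B (Python) =====
-- def SplitStacktrace(stacktrace_string):
--   """Two-phase re-implementation: first partition the stripped lines into
--   header-led sections, then assign each section's body by its header."""
--   lines = [l.strip() for l in stacktrace_string.splitlines()]
--
--   # Phase 1: partition into sections, each a (header, body) pair.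
--   sections = []
--   for l in lines:
--     if l.startswith('+-') and l.endswith('-+'):
--       sections.append((l, []))
--     elif sections:
--       sections[-1][1].append(l)
--
--   # Phase 2: assign bodies; a later matching section overwrites an earlier one.
--   release = None
--   debug = None
--   for header, body in sections:
--     if 'Release Build Stacktrace' in header:
--       release = body
--     elif 'Debug Build Stacktrace' in header:
--       debug = body
--   return (release, debug)
-- ===== Notes on version B (the rewrite author's own statement) =====
-- stated objective: alternative
-- what changed: Replaces A's single stateful pass with a mutable flag and list aliasing by a two-phase decomposition: first partition the stripped lines into header-led (header, body) sections, then a second scan assigns each section's body to release/debug with last occurrence winning.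
import Mathlib
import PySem

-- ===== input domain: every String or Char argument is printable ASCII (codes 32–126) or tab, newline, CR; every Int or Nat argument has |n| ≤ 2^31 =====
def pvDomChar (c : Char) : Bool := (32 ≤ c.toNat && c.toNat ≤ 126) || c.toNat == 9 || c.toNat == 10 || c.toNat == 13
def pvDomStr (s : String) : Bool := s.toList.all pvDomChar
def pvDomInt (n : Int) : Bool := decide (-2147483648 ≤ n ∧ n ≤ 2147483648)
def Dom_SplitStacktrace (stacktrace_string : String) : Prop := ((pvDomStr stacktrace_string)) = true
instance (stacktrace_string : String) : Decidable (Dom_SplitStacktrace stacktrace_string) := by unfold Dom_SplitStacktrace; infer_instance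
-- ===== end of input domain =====

-- B replaces A's one-pass flag-and-aliasing state machine by a two-phase decomposition
-- (partition into header-led sections, then assign bodies); same values, no speed claim.

-- ===== PORT A =====
-- shared string predicates (the same literal tests both Pythons perform)
def pvIsHeader (l : String) : Bool := PySem.Str.startswith l "+-" && PySem.Str.endswith l "-+"
def pvHasRel (l : String) : Bool := PySem.Str.isIn "Release Build Stacktrace" l
def pvHasDbg (l : String) : Bool := PySem.Str.isIn "Debug Build Stacktrace" l

-- A's loop state: Python aliases `current_stacktrace_lines` with one of the two result
-- variables; the alias is modelled by `Mode` saying which variable the appends go to.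
inductive PvMode | ignore | rel | dbg
deriving DecidableEq, Repr

-- one iteration of A's for-loop (strip, header dispatch, else append to the aliased list)
def pvStepA (st : PvMode × Option (List String) × Option (List String)) (line0 : String) :
    PvMode × Option (List String) × Option (List String) :=
  let line := PySem.Str.strip line0
  match st with
  | (m, r, d) =>
    if pvIsHeader line then
      if pvHasRel line then (PvMode.rel, some [], d)
      else if pvHasDbg line then (PvMode.dbg, r, some [])
      else (PvMode.ignore, r, d)
    else
      match m with
      | PvMode.rel => (PvMode.rel, some ((r.getD []) ++ [line]), d)
      | PvMode.dbg => (PvMode.dbg, r, some ((d.getD []) ++ [line]))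
      | PvMode.ignore => (PvMode.ignore, r, d)

def SplitStacktrace (stacktrace_string : String) : Option (List String) × Option (List String) :=
  let st := (PySem.Str.splitlines stacktrace_string).foldl pvStepA (PvMode.ignore, none, none)
  (st.2.1, st.2.2)

-- ===== PORT B =====
-- phase 1: one iteration of the section-building loop
def pvStepB (sections : List (String × List String)) (l : String) :
    List (String × List String) :=
  if pvIsHeader l then sections ++ [(l, [])]
  else
    match sections.getLast? with
    | none => sections
    | some (h, b) => sections.dropLast ++ [(h, b ++ [l])]

-- phase 2: one iteration of the assignment loop (later matching section overwrites)
def pvAssign (st : Option (List String) × Option (List String)) (sec : String × List String) :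
    Option (List String) × Option (List String) :=
  if pvHasRel sec.1 then (some sec.2, st.2)
  else if pvHasDbg sec.1 then (st.1, some sec.2)
  else st

def SplitStacktrace_alt (stacktrace_string : String) : Option (List String) × Option (List String) :=
  let lines := (PySem.Str.splitlines stacktrace_string).map (fun l => PySem.Str.strip l)
  let sections := lines.foldl pvStepB []
  sections.foldl pvAssign (none, none)

-- ===== PRECONDITION & SPEC =====
def Spec_SplitStacktrace (stacktrace_string : String) (out : Option (List String) × Option (List String)) : Prop := out = SplitStacktrace_alt stacktrace_string
instance (stacktrace_string : String) (out : Option (List String) × Option (List String)) : Decidable (Spec_SplitStacktrace stacktrace_string out) := by unfold Spec_SplitStacktrace; infer_instance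

-- ===== CLAIM (what is proved, stated in full; the proofs are below) =====
def Claim_equal_SplitStacktrace : Prop := ∀ (stacktrace_string : String), Dom_SplitStacktrace stacktrace_string → Spec_SplitStacktrace stacktrace_string (SplitStacktrace stacktrace_string)

-- ===== LEMMAS AND PROOFS =====

-- A's fold step on an already-stripped line
def pvStepAs (st : PvMode × Option (List String) × Option (List String)) (line : String) :
    PvMode × Option (List String) × Option (List String) :=
  if pvIsHeader line then
    if pvHasRel line then (PvMode.rel, some [], st.2.2)
    else if pvHasDbg line then (PvMode.dbg, st.2.1, some [])
    else (PvMode.ignore, st.2.1, st.2.2)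
  else
    match st.1 with
    | PvMode.rel => (PvMode.rel, some ((st.2.1.getD []) ++ [line]), st.2.2)
    | PvMode.dbg => (PvMode.dbg, st.2.1, some ((st.2.2.getD []) ++ [line]))
    | PvMode.ignore => st

lemma pvStepA_eq (st : PvMode × Option (List String) × Option (List String)) (l : String) :
    pvStepA st l = pvStepAs st (PySem.Str.strip l) := by
  obtain ⟨m, r, d⟩ := st
  simp only [pvStepA, pvStepAs]
  cases m <;> split_ifs <;> rfl

-- the mode A's state machine is in, read off the sections built so far
def pvModeOf (sections : List (String × List String)) : PvMode :=
  match sections.getLast? with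
  | none => PvMode.ignore
  | some (h, _) => if pvHasRel h then PvMode.rel
                   else if pvHasDbg h then PvMode.dbg
                   else PvMode.ignore

-- key invariant: A's fold state = (mode of the last section, B-phase-2 over the sections)
lemma pvKey (ls : List String) :
    ls.foldl pvStepAs (PvMode.ignore, none, none) =
      (pvModeOf (ls.foldl pvStepB []),
       (ls.foldl pvStepB []).foldl pvAssign (none, none)) := by
  induction ls using List.reverseRecOn with
  | nil => rfl
  | append_singleton ls l ih =>
    rw [List.foldl_append, List.foldl_append, ih]
    set S := ls.foldl pvStepB [] with hS
    simp only [List.foldl_cons, List.foldl_nil]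
    by_cases hh : pvIsHeader l
    · -- header line: a new section is appended
      simp only [pvStepAs, pvStepB, hh, if_pos]
      rcases em (pvHasRel l = true) with hr | hr <;>
        rcases em (pvHasDbg l = true) with hd | hd <;>
        simp [hr, hd, pvModeOf, pvAssign, List.foldl_append]
    · -- non-header line
      rcases List.eq_nil_or_concat S with h0 | ⟨S', ⟨h, b⟩, hSc⟩
      · simp [pvStepAs, pvStepB, hh, h0, pvModeOf]
      · rw [hSc, List.concat_eq_append]
        have hB : pvStepB (S' ++ [(h, b)]) l = S' ++ [(h, b ++ [l])] := by
          simp [pvStepB, hh]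
        rw [hB]
        simp only [pvModeOf, List.getLast?_concat, List.foldl_append, List.foldl_cons,
          List.foldl_nil]
        rcases em (pvHasRel h = true) with hr | hr
        · simp [pvStepAs, hh, hr, pvAssign]
        · rcases em (pvHasDbg h = true) with hd | hd
          · simp [pvStepAs, hh, hr, hd, pvAssign]
          · simp [pvStepAs, hh, hr, hd, pvAssign]

-- ===== VERDICT (by name: the statement is the Claim_ definition above) =====
theorem SplitStacktrace_spec : Claim_equal_SplitStacktrace := by
  intro s _
  unfold Spec_SplitStacktrace SplitStacktrace SplitStacktrace_alt
  have h1 : (PySem.Str.splitlines s).foldl pvStepA (PvMode.ignore, none, none)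
      = ((PySem.Str.splitlines s).map (fun l => PySem.Str.strip l)).foldl pvStepAs
          (PvMode.ignore, none, none) := by
    rw [List.foldl_map]
    exact List.foldl_ext _ _ _ (fun st l _ => pvStepA_eq st l)
  rw [h1, pvKey]
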